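-- pv_equiv track=rewrite | github.com/Bertonlome/Data_Analysis | team-analyzer/team-analyzer.py | extract_task_sequence
-- ===== SOURCE A (Python) =====
-- def extract_task_sequence(events, start_uuid, end_uuid):
--     """Extract tasks between start and end markers"""
--     # Find indices
--     start_idx = None
--     end_idx = None
--
--     for i, event in enumerate(events):
--         if event['uuid'] == start_uuid:
--             start_idx = i
--         if event['uuid'] == end_uuid:
--             end_idx = i
--
--     if start_idx is None:
--         raise ValueError(f"Start event not found: {start_uuid}")
--     if end_idx is None:
--         raise ValueError(f"End event not found: {end_uuid}")
--
--     # Extract tasks (from start_idx to end_idx-1, as end event is not a task)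
--     tasks = events[start_idx:end_idx]
--
--     return tasks, events[end_idx]  # Return tasks and end marker
-- ===== SOURCE B (Python) =====
-- def extract_task_sequence(events, start_uuid, end_uuid):
--     """Extract tasks between start and end markers (reverse-scan re-implementation)"""
--     # Stage 1: project out all uuids (so a malformed event raises KeyError, as in A).
--     uuids = [event['uuid'] for event in events]
--     # Stage 2: the LAST occurrence of a uuid is the FIRST occurrence in the reversed
--     # projection; map its position back with len - 1 - j.
--     rev = uuids[::-1]
--     if start_uuid not in rev:
--         raise ValueError(f"Start event not found: {start_uuid}")
--     if end_uuid not in rev: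
--         raise ValueError(f"End event not found: {end_uuid}")
--     start_idx = len(events) - 1 - rev.index(start_uuid)
--     end_idx = len(events) - 1 - rev.index(end_uuid)
--     return events[start_idx:end_idx], events[end_idx]
-- ===== Notes on version B (the rewrite author's own statement) =====
-- stated objective: alternative
-- what changed: Instead of one forward enumerate loop that keeps overwriting two Optional index accumulators, B projects the uuids into a list, reverses it, and recovers each marker's last index as len-1-rev.index(marker) (first occurrence in the reversed projection), raising the same ValueErrors on a missing marker.
import Mathlib
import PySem

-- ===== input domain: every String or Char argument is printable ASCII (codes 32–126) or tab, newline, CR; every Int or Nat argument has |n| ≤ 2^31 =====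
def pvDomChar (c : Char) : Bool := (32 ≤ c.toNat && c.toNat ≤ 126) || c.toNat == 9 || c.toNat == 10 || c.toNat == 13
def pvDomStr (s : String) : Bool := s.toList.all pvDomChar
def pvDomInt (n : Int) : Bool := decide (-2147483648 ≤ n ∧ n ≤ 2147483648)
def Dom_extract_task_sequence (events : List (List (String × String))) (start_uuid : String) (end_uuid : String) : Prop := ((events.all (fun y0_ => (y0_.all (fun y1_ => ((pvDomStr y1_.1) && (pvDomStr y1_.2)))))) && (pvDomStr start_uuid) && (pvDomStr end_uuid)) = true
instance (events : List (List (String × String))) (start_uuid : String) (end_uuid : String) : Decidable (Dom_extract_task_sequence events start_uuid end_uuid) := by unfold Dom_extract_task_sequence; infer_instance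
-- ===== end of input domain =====

-- B replaces A's forward enumerate loop with two Optional accumulators by a uuid projection, a reversal, and index arithmetic (last index = len-1 - first index in the reversed projection); alternative decomposition, same O(n) cost. Equivalence proved on Pre_ (both markers present, every event has a 'uuid' key).


-- event['uuid'] (missing key = KeyError, excluded by Pre_; the "" default is never read there)
def pvUuid (ev : List (String × String)) : String := ((PySem.Dict.mk ev).get? "uuid").getD ""

-- ===== PORT A =====
-- A: one enumerate pass keeping two Optional index accumulators (last match wins), then slice.
def extract_task_sequence (events : List (List (String × String))) (start_uuid : String) (end_uuid : String) : (List (List (String × String))) × (List (String × String)) :=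
  let r := (PySem.List.enumerate events 0).foldl
    (fun (acc : Option Int × Option Int) p =>
      ((if pvUuid p.2 == start_uuid then some p.1 else acc.1),
       (if pvUuid p.2 == end_uuid then some p.1 else acc.2)))
    (none, none)
  match r.1, r.2 with
  | some si, some ei => (PySem.List.slice events (some si) (some ei), PySem.List.pyGetD events ei [])
  | _, _ => ([], [])   -- Python raises ValueError here; excluded by Pre_

-- ===== PORT B =====
-- B: project the uuids, reverse (uuids[::-1]; exact per PySem.List.slice?_none_none_neg_one),
-- then last index = len - 1 - (first index in the reversed projection).
def extract_task_sequence_alt (events : List (List (String × String))) (start_uuid : String) (end_uuid : String) : (List (List (String × String))) × (List (String × String)) :=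
  let uuids := events.map pvUuid
  let rev := uuids.reverse
  if start_uuid ∉ rev then ([], [])       -- Python raises ValueError here; excluded by Pre_
  else if end_uuid ∉ rev then ([], [])    -- Python raises ValueError here; excluded by Pre_
  else
    let start_idx : Int := (events.length : Int) - 1 - (((PySem.List.index? rev start_uuid).getD 0 : Nat) : Int)
    let end_idx : Int := (events.length : Int) - 1 - (((PySem.List.index? rev end_uuid).getD 0 : Nat) : Int)
    (PySem.List.slice events (some start_idx) (some end_idx), PySem.List.pyGetD events end_idx [])

-- ===== PRECONDITION & SPEC =====
-- Pre_ excludes exactly the inputs where Python A raises: an event without a 'uuid' key (KeyError)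
-- or a start/end uuid that occurs in no event (ValueError).
def Pre_extract_task_sequence (events : List (List (String × String))) (start_uuid : String) (end_uuid : String) : Prop :=
  (events.all (fun ev => ((PySem.Dict.mk ev).get? "uuid").isSome)
   && events.any (fun ev => pvUuid ev == start_uuid)
   && events.any (fun ev => pvUuid ev == end_uuid)) = true
instance (events : List (List (String × String))) (start_uuid : String) (end_uuid : String) : Decidable (Pre_extract_task_sequence events start_uuid end_uuid) := by unfold Pre_extract_task_sequence; infer_instance
def pvWitness_extract_task_sequence : (List (List (String × String))) × String × String :=
  ([[("uuid", "a"), ("task", "t1")], [("uuid", "b")]], "a", "b")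

def Spec_extract_task_sequence (events : List (List (String × String))) (start_uuid : String) (end_uuid : String) (out : (List (List (String × String))) × (List (String × String))) : Prop := out = extract_task_sequence_alt events start_uuid end_uuid
instance (events : List (List (String × String))) (start_uuid : String) (end_uuid : String) (out : (List (List (String × String))) × (List (String × String))) : Decidable (Spec_extract_task_sequence events start_uuid end_uuid out) := by unfold Spec_extract_task_sequence; infer_instance

-- ===== CLAIM (what is proved, stated in full; the proofs are below) =====
def Claim_equal_extract_task_sequence : Prop := ∀ (events : List (List (String × String))) (start_uuid : String) (end_uuid : String), Dom_extract_task_sequence events start_uuid end_uuid → Pre_extract_task_sequence events start_uuid end_uuid → Spec_extract_task_sequence events start_uuid end_uuid (extract_task_sequence events start_uuid end_uuid)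

-- ===== LEMMAS AND PROOFS =====

-- first index in a list extended on the right
theorem index?_snoc (us : List String) (c v : String) :
    PySem.List.index? (us ++ [c]) v =
      if v ∈ us then PySem.List.index? us v
      else if c = v then some us.length else none := by
  by_cases h : v ∈ us
  · rw [if_pos h, PySem.List.index?_append_of_mem [c] h]
  · rw [if_neg h]
    by_cases hc : c = v
    · subst hc
      rw [if_pos rfl, PySem.List.index?_append_singleton_self us c h]
    · rw [if_neg hc, (PySem.List.index?_eq_none_iff _ _).mpr (by simp [h, Ne.symm hc])]

-- one component of the cons step of the fold characterization
theorem comp_step (rt : List String) (v u : String) (i0 : Int) (m : Nat) (a : Option Int)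
    (hn : rt.length = m) :
    (match PySem.List.index? rt v with
      | some j => some (i0 + 1 + (m : Int) - 1 - (j : Int))
      | none => if u == v then some i0 else a)
    = (match (if v ∈ rt then PySem.List.index? rt v
              else if u = v then some rt.length else none) with
      | some j => some (i0 + ((m : Int) + 1) - 1 - (j : Int))
      | none => a) := by
  by_cases h : v ∈ rt
  · rw [if_pos h]
    obtain ⟨j, hj⟩ := Option.isSome_iff_exists.mp ((PySem.List.index?_isSome_iff rt v).mpr h)
    rw [hj]
    simp only [Option.some.injEq]
    ring
  · rw [if_neg h, (PySem.List.index?_eq_none_iff rt v).mpr h]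
    by_cases hu : u = v
    · rw [if_pos hu]
      simp only [hu, beq_self_eq_true, if_true, hn, Option.some.injEq]
      ring
    · simp [hu]

-- A's fold characterized by the first index of each marker in the reversed uuid projection
theorem foldA_eq (l : List (List (String × String))) (s e : String) (i0 : Int)
    (acc : Option Int × Option Int) :
    ((PySem.List.enumerate l i0).foldl
      (fun (a : Option Int × Option Int) p =>
        ((if pvUuid p.2 == s then some p.1 else a.1),
         (if pvUuid p.2 == e then some p.1 else a.2))) acc)
    = ((match PySem.List.index? (l.map pvUuid).reverse s with
        | some j => some (i0 + (l.length : Int) - 1 - (j : Int)) | none => acc.1),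
       (match PySem.List.index? (l.map pvUuid).reverse e with
        | some j => some (i0 + (l.length : Int) - 1 - (j : Int)) | none => acc.2)) := by
  induction l generalizing i0 acc with
  | nil => simp [PySem.List.enumerate_nil, PySem.List.index?]
  | cons x t ih =>
    have hrev : ((x :: t).map pvUuid).reverse = (t.map pvUuid).reverse ++ [pvUuid x] := by simp
    rw [PySem.List.enumerate_cons, List.foldl_cons, ih, hrev, index?_snoc, index?_snoc]
    simp only [List.length_cons, Nat.cast_add, Nat.cast_one]
    refine Prod.ext ?_ ?_
    · exact comp_step _ s (pvUuid x) i0 t.length acc.1 (by simp)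
    · exact comp_step _ e (pvUuid x) i0 t.length acc.2 (by simp)

-- ===== VERDICT (by name: the statement is the Claim_ definition above) =====
theorem extract_task_sequence_spec : Claim_equal_extract_task_sequence := by
  intro events s e _ hpre
  unfold Pre_extract_task_sequence at hpre
  simp only [Bool.and_eq_true, List.all_eq_true, List.any_eq_true, beq_iff_eq] at hpre
  obtain ⟨⟨-, evs, hevs, hseq⟩, eve, heve, heeq⟩ := hpre
  have hsmem : s ∈ (events.map pvUuid).reverse := by
    simp only [List.mem_reverse, List.mem_map]; exact ⟨evs, hevs, hseq⟩
  have hemem : e ∈ (events.map pvUuid).reverse := by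
    simp only [List.mem_reverse, List.mem_map]; exact ⟨eve, heve, heeq⟩
  unfold Spec_extract_task_sequence extract_task_sequence extract_task_sequence_alt
  rw [foldA_eq]
  obtain ⟨js, hjs⟩ := Option.isSome_iff_exists.mp ((PySem.List.index?_isSome_iff _ s).mpr hsmem)
  obtain ⟨je, hje⟩ := Option.isSome_iff_exists.mp ((PySem.List.index?_isSome_iff _ e).mpr hemem)
  simp only [PySem.List.index?_eq_idxOf?] at hjs hje
  simp [hjs, hje, hsmem, hemem]
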